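-- pv_equiv track=rewrite | github.com/ssrivastava22/NowNotes | detection_processing.py | _group_rectangles
-- ===== SOURCE A (Python) =====
-- def union(a,b):
--     x_coord = min(a[0], b[0])
--     y_coord = min(a[1], b[1])
--     width = max(a[0]+a[2], b[0]+b[2]) - x_coord
--     height = max(a[1]+a[3], b[1]+b[3]) - y_coord
--     return [x_coord, y_coord, width, height]
--
-- def _intersect(a,b):
--     x_coord = max(a[0], b[0])
--     y_coord = max(a[1], b[1])
--     width = min(a[0]+a[2], b[0]+b[2]) - x_coord
--     height = min(a[1]+a[3], b[1]+b[3]) - y_coord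
--     if width < 0 or height < 0:
--         return False
--     return True
--
-- def _group_rectangles(rects):
--     test = [False for i in range(len(rects))]
--     final_groups = []
--     i = 0
--     while i < len(rects):
--         if not test[i]:
--             j = i+1
--             while j < len(rects):
--                 if not test[j] and _intersect(rects[i], rects[j]):
--                     rects[i] = union(rects[i], rects[j])
--                     test[j] = True
--                     j = i
--                 j += 1
--             final_groups += [rects[i]]
--         i += 1
--
--     return final_groups
-- ===== SOURCE B (Python) =====
-- # B: same grouping, but instead of a boolean used-mask with index-reset rescanning,
-- # repeatedly extract the first pending rectangle intersecting the growing box from a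
-- # shrinking pending list. Return value only: B does not mutate its argument (A does).
--
-- def union(a, b):
--     x_coord = min(a[0], b[0])
--     y_coord = min(a[1], b[1])
--     width = max(a[0] + a[2], b[0] + b[2]) - x_coord
--     height = max(a[1] + a[3], b[1] + b[3]) - y_coord
--     return [x_coord, y_coord, width, height]
--
-- def _intersect(a, b):
--     x_coord = max(a[0], b[0])
--     y_coord = max(a[1], b[1])
--     width = min(a[0] + a[2], b[0] + b[2]) - x_coord
--     height = min(a[1] + a[3], b[1] + b[3]) - y_coord
--     if width < 0 or height < 0:
--         return False
--     return True
--
-- def _group_rectangles(rects):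
--     groups = []
--     rest = list(rects)
--     while rest:
--         box, rest = rest[0], rest[1:]
--         while True:
--             hit = next((k for k, r in enumerate(rest) if _intersect(box, r)), None)
--             if hit is None:
--                 break
--             box = union(box, rest.pop(hit))
--         groups.append(box)
--     return groups
-- ===== Notes on version B (the rewrite author's own statement) =====
-- stated objective: simpler
-- what changed: Replaces A's boolean used-mask with j=i index-reset rescanning over a fixed array by repeatedly extracting the first intersecting rectangle (find-first + pop) from a shrinking pending list, one group per round; same absorption order, plainer bookkeeping.
import Mathlib
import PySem

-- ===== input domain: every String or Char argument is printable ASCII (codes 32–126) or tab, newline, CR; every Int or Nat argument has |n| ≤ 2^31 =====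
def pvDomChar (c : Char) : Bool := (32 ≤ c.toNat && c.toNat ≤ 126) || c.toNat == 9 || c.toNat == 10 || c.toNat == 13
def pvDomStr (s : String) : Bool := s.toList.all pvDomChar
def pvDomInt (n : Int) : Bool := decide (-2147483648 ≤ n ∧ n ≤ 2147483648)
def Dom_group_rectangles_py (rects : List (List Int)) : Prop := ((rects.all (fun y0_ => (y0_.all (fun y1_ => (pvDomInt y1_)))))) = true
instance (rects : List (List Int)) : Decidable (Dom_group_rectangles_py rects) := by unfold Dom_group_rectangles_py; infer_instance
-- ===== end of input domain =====

-- B replaces A's boolean used-mask with index-reset rescanning by find-first-hit extraction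
-- from a shrinking pending list (objective: simpler). Return value only: A mutates `rects`
-- in place (rects[i] = union(...)), B does not.

-- ===== PORT A =====
-- a[k] for k = 0..3 on a rect: exact via getD whenever k < a.length, which Pre_ guarantees
-- wherever Python evaluates these expressions (Python raises IndexError otherwise).
def pvIdx (a : List Int) (k : Nat) : Int := a.getD k 0

-- Python `union`
def pvUnionR (a b : List Int) : List Int :=
  let x_coord := min (pvIdx a 0) (pvIdx b 0)
  let y_coord := min (pvIdx a 1) (pvIdx b 1)
  let width := max (pvIdx a 0 + pvIdx a 2) (pvIdx b 0 + pvIdx b 2) - x_coord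
  let height := max (pvIdx a 1 + pvIdx a 3) (pvIdx b 1 + pvIdx b 3) - y_coord
  [x_coord, y_coord, width, height]

-- Python `_intersect`
def pvIntersectR (a b : List Int) : Bool :=
  let x_coord := max (pvIdx a 0) (pvIdx b 0)
  let y_coord := max (pvIdx a 1) (pvIdx b 1)
  let width := min (pvIdx a 0 + pvIdx a 2) (pvIdx b 0 + pvIdx b 2) - x_coord
  let height := min (pvIdx a 1 + pvIdx a 3) (pvIdx b 1 + pvIdx b 3) - y_coord
  if width < 0 ∨ height < 0 then false else true

-- A's inner `while j < len(rects)` loop; state (rects, test, j); `j = i; j += 1` is the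
-- reset to i+1.  The fuel argument and the `j < test.length` conjunct are pure totality
-- guards: with the fuel outerA supplies the 0 case is never reached (proved in inner_sim),
-- and test always has the same length as rects.
def loopA : Nat → List (List Int) → List Bool → Nat → Nat → List (List Int) × List Bool
  | 0, rects, test, _, _ => (rects, test)
  | f + 1, rects, test, i, j =>
    if j < rects.length ∧ j < test.length then
      if (!(test.getD j false)) && pvIntersectR (rects.getD i []) (rects.getD j []) then
        loopA f (rects.set i (pvUnionR (rects.getD i []) (rects.getD j []))) (test.set j true)
          i (i + 1)
      else loopA f rects test i (j + 1)
    else (rects, test)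

-- A's outer `while i < len(rects)` loop; the fuel k is a totality guard (= number of
-- remaining indices, rects never changes length).
def outerA : Nat → List (List Int) → List Bool → Nat → List (List Int) → List (List Int)
  | 0, _, _, _, final_groups => final_groups
  | k + 1, rects, test, i, final_groups =>
    if i < rects.length then
      if !(test.getD i false) then
        let p := loopA ((test.count false + 1) * (rects.length + 1)) rects test i (i + 1)
        outerA k p.1 p.2 (i + 1) (final_groups ++ [p.1.getD i []])
      else outerA k rects test (i + 1) final_groups
    else final_groups

def group_rectangles_py (rects : List (List Int)) : List (List Int) :=
  outerA rects.length rects (List.replicate rects.length false) 0 []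

-- ===== PORT B =====
-- B's inner `while True` loop: find the first pending rect hitting the box (Python's
-- `next((k for k, r in enumerate(rest) if _intersect(box, r)), None)` = findIdx?),
-- absorb it (`rest.pop(hit)` = read + eraseIdx) and repeat.  Fuel (= rest.length, one
-- element is removed per round) is a totality guard only.
def absorbB : Nat → List Int → List (List Int) → List Int × List (List Int)
  | 0, box, rest => (box, rest)
  | f + 1, box, rest =>
    match rest.findIdx? (fun r => pvIntersectR box r) with
    | none => (box, rest)
    | some k => absorbB f (pvUnionR box (rest.getD k [])) (rest.eraseIdx k)

-- B's outer `while rest` loop, one group per round; fuel (= initial length) is a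
-- totality guard only.
def outerB : Nat → List (List Int) → List (List Int)
  | 0, _ => []
  | f + 1, pending =>
    match pending with
    | [] => []
    | r :: rest =>
      let p := absorbB rest.length r rest
      p.1 :: outerB f p.2

def group_rectangles_py_alt (rects : List (List Int)) : List (List Int) :=
  outerB rects.length rects

-- ===== PRECONDITION & SPEC =====
-- Exactly the inputs where Python A returns: with ≥ 2 rects, every rect is indexed at
-- [0]..[3] (IndexError on any rect shorter than 4); with ≤ 1 rect no element is indexed.
def Pre_group_rectangles_py (rects : List (List Int)) : Prop :=
  rects.length ≤ 1 ∨ ∀ r ∈ rects, 4 ≤ r.length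
instance (rects : List (List Int)) : Decidable (Pre_group_rectangles_py rects) := by
  unfold Pre_group_rectangles_py; infer_instance

def pvWitness_group_rectangles_py : List (List Int) :=
  [[0, 0, 2, 2], [1, 1, 2, 2], [10, 10, 1, 1]]

def Spec_group_rectangles_py (rects : List (List Int)) (out : List (List Int)) : Prop :=
  out = group_rectangles_py_alt rects
instance (rects : List (List Int)) (out : List (List Int)) :
    Decidable (Spec_group_rectangles_py rects out) := by
  unfold Spec_group_rectangles_py; infer_instance

-- ===== CLAIM (what is proved, stated in full; the proofs are below) =====
def Claim_equal_group_rectangles_py : Prop :=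
  ∀ (rects : List (List Int)), Dom_group_rectangles_py rects →
    Pre_group_rectangles_py rects →
    Spec_group_rectangles_py rects (group_rectangles_py rects)

-- ===== LEMMAS AND PROOFS =====

-- flipping an unused flag strictly decreases the number of unused flags
theorem pvCountFalseSetLt : ∀ (l : List Bool) (j : Nat), j < l.length →
    l.getD j false = false → (l.set j true).count false < l.count false := by
  intro l
  induction l with
  | nil => intro j h; simp at h
  | cons a t ih =>
    intro j hj hg
    cases j with
    | zero => simp_all
    | succ m =>
      simp only [List.set, List.count_cons]
      have := ih m (by simpa using hj) (by simpa using hg)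
      omega

theorem absorbB_len_le : ∀ (f : Nat) (box : List Int) (rest : List (List Int)),
    (absorbB f box rest).2.length ≤ rest.length := by
  intro f
  induction f with
  | zero => intro box rest; simp [absorbB]
  | succ m ih =>
    intro box rest
    cases hfind : rest.findIdx? (fun r => pvIntersectR box r) with
    | none => simp [absorbB, hfind]
    | some k =>
      have hk : k < rest.length := by
        have := List.findIdx?_eq_some_iff_findIdx_eq.mp hfind
        omega
      simp only [absorbB, hfind]
      calc (absorbB m (pvUnionR box (rest.getD k [])) (rest.eraseIdx k)).2.length
          ≤ (rest.eraseIdx k).length := ih _ _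
        _ ≤ rest.length := by rw [List.length_eraseIdx_of_lt hk]; omega

-- outerB ignores how much fuel it gets beyond the pending length
theorem outerB_fuel : ∀ (f f' : Nat) (pending : List (List Int)), pending.length ≤ f →
    pending.length ≤ f' → outerB f pending = outerB f' pending := by
  intro f
  induction f with
  | zero =>
    intro f' pending hf hf'
    have : pending = [] := List.eq_nil_of_length_eq_zero (by omega)
    subst this
    cases f' <;> simp [outerB]
  | succ m ih =>
    intro f' pending hf hf'
    cases pending with
    | nil => cases f' <;> simp [outerB]
    | cons r rest =>
      cases f' with
      | zero => simp at hf'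
      | succ m' =>
        simp only [outerB]
        have hlen : (absorbB rest.length r rest).2.length ≤ rest.length :=
          absorbB_len_le _ _ _
        rw [ih m' _ (by simp at hf; omega) (by simp at hf'; omega)]

-- number of k in [i, i+n) with test[k] "unused" (getD-false)
def cntF (test : List Bool) : Nat → Nat → Nat
  | _, 0 => 0
  | i, n + 1 => (if test.getD i false then 0 else 1) + cntF test (i + 1) n

-- the unused rects with index in [i, i+n), in index order
def selF (rects : List (List Int)) (test : List Bool) : Nat → Nat → List (List Int)
  | _, 0 => []
  | i, n + 1 =>
    if test.getD i false then selF rects test (i + 1) n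
    else rects.getD i [] :: selF rects test (i + 1) n

theorem sel_len : ∀ (n i : Nat) (rects : List (List Int)) (test : List Bool),
    (selF rects test i n).length = cntF test i n := by
  intro n
  induction n with
  | zero => intro i rects test; simp [selF, cntF]
  | succ m ih =>
    intro i rects test
    simp only [selF, cntF]
    split <;> simp [ih, Nat.add_comm]

theorem cnt_succ_right : ∀ (n i : Nat) (test : List Bool),
    cntF test i (n + 1) = cntF test i n + (if test.getD (i + n) false then 0 else 1) := by
  intro n
  induction n with
  | zero => intro i test; simp [cntF]
  | succ m ih =>
    intro i test
    have : cntF test i (m + 1 + 1) = (if test.getD i false then 0 else 1) + cntF test (i+1) (m+1) := rfl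
    rw [this, ih (i+1) test]
    have : cntF test i (m + 1) = (if test.getD i false then 0 else 1) + cntF test (i+1) m := rfl
    rw [this]
    have : i + 1 + m = i + (m + 1) := by omega
    rw [this]
    omega

theorem cnt_mono : ∀ (test : List Bool) (i a b : Nat), a ≤ b → cntF test i a ≤ cntF test i b := by
  intro test i a b hab
  induction b with
  | zero => simp_all
  | succ m ih =>
    rcases Nat.lt_or_ge a (m + 1) with h | h
    · have := ih (by omega)
      rw [cnt_succ_right]
      split <;> omega
    · have : a = m + 1 := by omega
      simp [this]

theorem cnt_lt : ∀ (test : List Bool) (i d n : Nat), d < n →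
    test.getD (i + d) false = false → cntF test i d < cntF test i n := by
  intro test i d n hdn hg
  have h1 : cntF test i (d + 1) = cntF test i d + 1 := by
    rw [cnt_succ_right, hg]; simp
  have := cnt_mono test i (d + 1) n hdn
  omega

theorem sel_get : ∀ (n d i : Nat) (rects : List (List Int)) (test : List Bool), d < n →
    test.getD (i + d) false = false →
    (selF rects test i n).getD (cntF test i d) [] = rects.getD (i + d) [] := by
  intro n
  induction n with
  | zero => intro d i rects test h; omega
  | succ m ih =>
    intro d i rects test hdn hg
    cases d with
    | zero =>
      simp only [Nat.add_zero] at hg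
      simp only [selF, cntF, hg, Bool.false_eq_true, if_false, List.getD_cons_zero, Nat.add_zero]
    | succ e =>
      have he : i + (e + 1) = (i + 1) + e := by omega
      rw [he] at hg
      have hrec := ih e (i + 1) rects test (by omega) hg
      simp only [selF, cntF]
      by_cases ht : test.getD i false = true
      · rw [if_pos ht, if_pos ht, Nat.zero_add, hrec, he]
      · rw [if_neg ht, if_neg ht, Nat.add_comm 1 (cntF test (i+1) e), List.getD_cons_succ,
          hrec, he]

theorem sel_set_rects : ∀ (n i a : Nat) (v : List Int) (rects : List (List Int)) (test : List Bool),
    a < i → selF (rects.set a v) test i n = selF rects test i n := by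
  intro n
  induction n with
  | zero => intro i a v rects test h; simp [selF]
  | succ m ih =>
    intro i a v rects test hai
    simp only [selF]
    have hget : (rects.set a v).getD i [] = rects.getD i [] := by
      simp [List.getD_eq_getElem?_getD, List.getElem?_set_ne (by omega : a ≠ i)]
    rw [hget, ih (i + 1) a v rects test (by omega)]

theorem sel_set_test : ∀ (n i a : Nat) (v : Bool) (rects : List (List Int)) (test : List Bool),
    a < i → selF rects (test.set a v) i n = selF rects test i n := by
  intro n
  induction n with
  | zero => intro i a v rects test h; simp [selF]
  | succ m ih =>
    intro i a v rects test hai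
    simp only [selF]
    have hget : (test.set a v).getD i false = test.getD i false := by
      simp [List.getD_eq_getElem?_getD, List.getElem?_set_ne (by omega : a ≠ i)]
    rw [hget, ih (i + 1) a v rects test (by omega)]

theorem sel_erase : ∀ (n d i : Nat) (rects : List (List Int)) (test : List Bool), d < n →
    i + d < test.length →
    test.getD (i + d) false = false →
    selF rects (test.set (i + d) true) i n = (selF rects test i n).eraseIdx (cntF test i d) := by
  intro n
  induction n with
  | zero => intro d i rects test h; omega
  | succ m ih =>
    intro d i rects test hdn hlen hg
    cases d with
    | zero =>
      simp only [Nat.add_zero] at hg hlen ⊢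
      have hset : (test.set i true).getD i false = true := by
        simp [List.getD_eq_getElem?_getD, List.getElem?_set_self hlen]
      simp only [selF, cntF, hg, hset, Bool.false_eq_true, if_false, if_true,
        List.eraseIdx_cons_zero]
      exact sel_set_test m (i + 1) i true rects test (by omega)
    | succ e =>
      have he : i + (e + 1) = (i + 1) + e := by omega
      rw [he] at hg hlen ⊢
      have hrec := ih e (i + 1) rects test (by omega) hlen hg
      have hget : (test.set ((i + 1) + e) true).getD i false = test.getD i false := by
        simp [List.getD_eq_getElem?_getD, List.getElem?_set_ne (by omega : (i + 1) + e ≠ i)]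
      simp only [selF, cntF, hget, hrec]
      by_cases ht : test.getD i false = true
      · rw [if_pos ht, if_pos ht, if_pos ht, Nat.zero_add]
      · rw [if_neg ht, if_neg ht, if_neg ht, Nat.add_comm 1 (cntF test (i+1) e),
          List.eraseIdx_cons_succ]

theorem findIdx?_of_prefix : ∀ (l : List (List Int)) (p : List Int → Bool) (k : Nat),
    k < l.length → (∀ m, m < k → p (l.getD m []) = false) → p (l.getD k []) = true →
    l.findIdx? p = some k := by
  intro l
  induction l with
  | nil => intro p k h; simp at h
  | cons a t ih =>
    intro p k hk hmiss hhit
    cases k with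
    | zero =>
      simp only [List.getD_cons_zero] at hhit
      simp [List.findIdx?_cons, hhit]
    | succ e =>
      have ha : p a = false := by
        have := hmiss 0 (by omega)
        simpa using this
      have := ih p e (by simpa using hk)
        (fun m hm => by have := hmiss (m + 1) (by omega); simpa using this)
        (by simpa using hhit)
      simp [List.findIdx?_cons, ha, this]

theorem findIdx?_none_of_miss : ∀ (l : List (List Int)) (p : List Int → Bool),
    (∀ m, m < l.length → p (l.getD m []) = false) → l.findIdx? p = none := by
  intro l p h
  rw [List.findIdx?_eq_none_iff]
  intro x hx
  rcases List.getElem_of_mem hx with ⟨m, hm, rfl⟩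
  have := h m hm
  simpa [List.getD_eq_getElem?_getD, List.getElem?_eq_getElem hm] using this

-- the simulation of A's inner loop by B's absorbB; the fuel hypothesis makes the
-- fuel-exhaustion branch unreachable
theorem inner_sim : ∀ (f : Nat) (rects : List (List Int)) (test : List Bool) (i j : Nat),
    test.length = rects.length → i < rects.length → i + 1 ≤ j →
    test.count false * (rects.length + 1) + (rects.length - j) < f →
    (∀ m, m < cntF test (i + 1) (j - (i + 1)) →
      pvIntersectR (rects.getD i [])
        ((selF rects test (i + 1) (rects.length - (i + 1))).getD m []) = false) →
    ((loopA f rects test i j).1.getD i [],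
      selF (loopA f rects test i j).1 (loopA f rects test i j).2 (i + 1)
        (rects.length - (i + 1)))
      = absorbB (selF rects test (i + 1) (rects.length - (i + 1))).length (rects.getD i [])
          (selF rects test (i + 1) (rects.length - (i + 1))) ∧
    (loopA f rects test i j).1.length = rects.length ∧
    (loopA f rects test i j).2.length = test.length := by
  intro f
  induction f with
  | zero => intro rects test i j hlen hi hij hfuel H; omega
  | succ fm ih =>
    intro rects test i j hlen hi hij hfuel H
    by_cases hg : j < rects.length ∧ j < test.length
    · by_cases hc : ((!(test.getD j false)) && pvIntersectR (rects.getD i [])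
          (rects.getD j [])) = true
      · -- merge step
        have hc' := hc
        rw [Bool.and_eq_true, Bool.not_eq_true'] at hc'
        obtain ⟨ht, hint⟩ := hc'
        have hd : i + 1 + (j - (i + 1)) = j := by omega
        have hdn : j - (i + 1) < rects.length - (i + 1) := by omega
        have hpend := sel_get (rects.length - (i + 1)) (j - (i + 1)) (i + 1) rects test hdn
          (by rw [hd]; exact ht)
        rw [hd] at hpend
        have hidx : cntF test (i + 1) (j - (i + 1)) <
            (selF rects test (i + 1) (rects.length - (i + 1))).length := by
          rw [sel_len]
          exact cnt_lt test (i + 1) _ _ hdn (by rw [hd]; exact ht)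
        have hfind : (selF rects test (i + 1) (rects.length - (i + 1))).findIdx?
            (fun r => pvIntersectR (rects.getD i []) r)
            = some (cntF test (i + 1) (j - (i + 1))) :=
          findIdx?_of_prefix _ _ _ hidx (fun m hm => H m hm) (by rw [hpend]; exact hint)
        have herase := sel_erase (rects.length - (i + 1)) (j - (i + 1)) (i + 1) rects test hdn
          (by omega) (by rw [hd]; exact ht)
        rw [hd] at herase
        have hu : (rects.set i (pvUnionR (rects.getD i []) (rects.getD j []))).getD i []
            = pvUnionR (rects.getD i []) (rects.getD j []) := by
          rw [List.getD_eq_getElem _ [] (by simpa using hi)]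
          simp
        have hcount : (test.set j true).count false < test.count false :=
          pvCountFalseSetLt test j hg.2 ht
        have hmul : (test.set j true).count false * (rects.length + 1) + (rects.length + 1)
            ≤ test.count false * (rects.length + 1) := by
          calc (test.set j true).count false * (rects.length + 1) + (rects.length + 1)
              = ((test.set j true).count false + 1) * (rects.length + 1) := by ring
            _ ≤ test.count false * (rects.length + 1) :=
                Nat.mul_le_mul_right _ (by omega)
        have IH := ih (rects.set i (pvUnionR (rects.getD i []) (rects.getD j [])))
          (test.set j true) i (i + 1) (by simpa using hlen) (by simpa using hi)
          (le_refl (i + 1)) (by simp only [List.length_set]; omega)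
          (by intro m hm; rw [Nat.sub_self] at hm; simp [cntF] at hm)
        obtain ⟨IH1, IH2, IH3⟩ := IH
        have hstep : loopA (fm + 1) rects test i j
            = loopA fm (rects.set i (pvUnionR (rects.getD i []) (rects.getD j [])))
                (test.set j true) i (i + 1) := by
          simp only [loopA, if_pos hg, hc, if_true]
        rw [hstep]
        refine ⟨?_, ?_, ?_⟩
        · rw [List.length_set] at IH1
          rw [IH1, hu, sel_set_rects _ _ _ _ _ _ (by omega), herase]
          have hL : (selF rects test (i + 1) (rects.length - (i + 1))).length
              = ((selF rects test (i + 1) (rects.length - (i + 1))).eraseIdx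
                  (cntF test (i + 1) (j - (i + 1)))).length + 1 := by
            rw [List.length_eraseIdx_of_lt hidx]; omega
          rw [hL]
          simp only [absorbB, hfind]
          rw [hpend]
        · rw [IH2, List.length_set]
        · rw [IH3, List.length_set]
      · -- skip step (used flag, or no intersection)
        have hd : i + 1 + (j - (i + 1)) = j := by omega
        have hsucc : j + 1 - (i + 1) = (j - (i + 1)) + 1 := by omega
        have H' : ∀ m, m < cntF test (i + 1) (j + 1 - (i + 1)) →
            pvIntersectR (rects.getD i [])
              ((selF rects test (i + 1) (rects.length - (i + 1))).getD m []) = false := by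
          intro m hm
          rw [hsucc, cnt_succ_right, hd] at hm
          by_cases ht : test.getD j false = true
          · rw [ht] at hm
            exact H m (by simpa using hm)
          · have htf : test.getD j false = false := by simpa using ht
            rw [htf] at hm
            simp only [Bool.false_eq_true, if_false] at hm
            rcases Nat.lt_or_ge m (cntF test (i + 1) (j - (i + 1))) with hlt | hge
            · exact H m hlt
            · have hmeq : m = cntF test (i + 1) (j - (i + 1)) := by omega
              have hdn : j - (i + 1) < rects.length - (i + 1) := by omega
              have hpend := sel_get (rects.length - (i + 1)) (j - (i + 1)) (i + 1) rects test
                hdn (by rw [hd]; exact htf)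
              rw [hd] at hpend
              rw [hmeq, hpend]
              rw [Bool.and_eq_true, Bool.not_eq_true'] at hc
              rcases Bool.eq_false_or_eq_true
                  (pvIntersectR (rects.getD i []) (rects.getD j [])) with htr | hf
              · exact absurd ⟨htf, htr⟩ hc
              · exact hf
        have IH := ih rects test i (j + 1) hlen hi (by omega) (by omega) H'
        have hstep : loopA (fm + 1) rects test i j = loopA fm rects test i (j + 1) := by
          simp only [loopA, if_pos hg]
          rw [if_neg (by simpa using hc)]
        rw [hstep]
        exact IH
    · -- scan finished: j ≥ rects.length
      have hstep : loopA (fm + 1) rects test i j = (rects, test) := by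
        simp only [loopA, if_neg hg]
      rw [hstep]
      refine ⟨?_, rfl, rfl⟩
      have hmiss : ∀ m, m < (selF rects test (i + 1) (rects.length - (i + 1))).length →
          pvIntersectR (rects.getD i [])
            ((selF rects test (i + 1) (rects.length - (i + 1))).getD m []) = false := by
        intro m hm
        rw [sel_len] at hm
        exact H m (lt_of_lt_of_le hm (cnt_mono test (i + 1) _ _ (by omega)))
      have hnone := findIdx?_none_of_miss _ _ hmiss
      cases hL : (selF rects test (i + 1) (rects.length - (i + 1))).length with
      | zero => simp [absorbB]
      | succ mm => simp only [absorbB, hnone]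

-- the simulation of A's outer loop by outerB
theorem outer_sim : ∀ (k : Nat) (rects : List (List Int)) (test : List Bool) (i : Nat)
    (groups : List (List Int)), rects.length - i ≤ k → test.length = rects.length →
    outerA k rects test i groups
      = groups ++ outerB (selF rects test i (rects.length - i)).length
          (selF rects test i (rects.length - i)) := by
  intro k
  induction k with
  | zero =>
    intro rects test i groups hk hlen
    have h0 : rects.length - i = 0 := by omega
    rw [h0]
    simp [selF, outerA, outerB]
  | succ m ih =>
    intro rects test i groups hk hlen
    by_cases hlt : i < rects.length
    · have hsub : rects.length - i = (rects.length - (i + 1)) + 1 := by omega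
      simp only [outerA, if_pos hlt]
      by_cases ht : test.getD i false = true
      · have ht2 := ht
        rw [List.getD_eq_getElem?_getD] at ht2
        rw [if_neg (by simp [ht2])]
        rw [hsub]
        simp only [selF, ht, if_true]
        exact ih rects test (i + 1) groups (by omega) hlen
      · have htf : test.getD i false = false := by simpa using ht
        have ht2 := htf
        rw [List.getD_eq_getElem?_getD] at ht2
        rw [if_pos (by simp [ht2])]
        have hfuel : test.count false * (rects.length + 1) + (rects.length - (i + 1))
            < (test.count false + 1) * (rects.length + 1) := by
          have hexp : (test.count false + 1) * (rects.length + 1)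
              = test.count false * (rects.length + 1) + (rects.length + 1) := by ring
          omega
        have HS := inner_sim ((test.count false + 1) * (rects.length + 1)) rects test i
          (i + 1) hlen hlt (le_refl (i + 1)) hfuel
          (by intro mm hm; rw [Nat.sub_self] at hm; simp [cntF] at hm)
        obtain ⟨HS1, HS2, HS3⟩ := HS
        set p := loopA ((test.count false + 1) * (rects.length + 1)) rects test i (i + 1)
          with hp
        have harg1 : p.1.length - (i + 1) ≤ m := by rw [HS2]; omega
        have harg2 : p.2.length = p.1.length := by rw [HS3, hlen, HS2]
        have IH := ih p.1 p.2 (i + 1) (groups ++ [p.1.getD i []]) harg1 harg2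
        rw [IH, HS2]
        rw [hsub]
        simp only [selF, htf, Bool.false_eq_true, if_false, List.length_cons]
        simp only [outerB]
        have hfst : (absorbB (selF rects test (i + 1) (rects.length - (i + 1))).length
            (rects.getD i []) (selF rects test (i + 1) (rects.length - (i + 1)))).1
            = p.1.getD i [] := by rw [← HS1]
        have hsnd : (absorbB (selF rects test (i + 1) (rects.length - (i + 1))).length
            (rects.getD i []) (selF rects test (i + 1) (rects.length - (i + 1)))).2
            = selF p.1 p.2 (i + 1) (rects.length - (i + 1)) := by rw [← HS1]
        have hle2 : (selF p.1 p.2 (i + 1) (rects.length - (i + 1))).length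
            ≤ (selF rects test (i + 1) (rects.length - (i + 1))).length := by
          rw [← hsnd]
          exact absorbB_len_le _ _ _
        rw [hfst, hsnd]
        rw [outerB_fuel (selF rects test (i + 1) (rects.length - (i + 1))).length
          (selF p.1 p.2 (i + 1) (rects.length - (i + 1))).length _ hle2 (le_refl _)]
        rw [List.append_assoc, List.singleton_append]
    · have h0 : rects.length - i = 0 := by omega
      simp only [outerA, if_neg hlt]
      rw [h0]
      simp [selF, outerB]

theorem sel_replicate : ∀ (rects : List (List Int)) (k i : Nat), rects.length - i ≤ k →
    selF rects (List.replicate rects.length false) i (rects.length - i) = rects.drop i := by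
  intro rects k
  induction k with
  | zero =>
    intro i hk
    have h0 : rects.length - i = 0 := by omega
    rw [h0]
    have hdrop : rects.drop i = [] := List.drop_eq_nil_iff.mpr (by omega)
    rw [hdrop]
    simp [selF]
  | succ m ih =>
    intro i hk
    by_cases hlt : i < rects.length
    · have hsub : rects.length - i = (rects.length - (i + 1)) + 1 := by omega
      rw [hsub]
      have hg : (List.replicate rects.length false).getD i false = false := by
        simp [List.getD_eq_getElem?_getD, hlt]
      simp only [selF, hg, Bool.false_eq_true, if_false]
      have hle : rects.length - (i + 1) ≤ m := by omega
      have hrec := ih (i + 1) hle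
      rw [hrec, List.getD_eq_getElem _ [] hlt, List.drop_eq_getElem_cons hlt]
    · have h0 : rects.length - i = 0 := by omega
      rw [h0]
      have hdrop : rects.drop i = [] := List.drop_eq_nil_iff.mpr (by omega)
      rw [hdrop]
      simp [selF]

-- ===== VERDICT (by name: the statement is the Claim_ definition above) =====
theorem group_rectangles_py_spec : Claim_equal_group_rectangles_py := by
  intro rects _ _
  unfold Spec_group_rectangles_py group_rectangles_py group_rectangles_py_alt
  rw [outer_sim rects.length rects _ 0 [] (by omega) (by simp),
    sel_replicate rects rects.length 0 (by omega), List.drop_zero, List.nil_append]
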